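-- pv_equiv track=rewrite | github.com/swosu/SwosuCsPythonExamples | CS2/Yahtzee/Zybook_Poker_Dice.py | find_high_score
-- ===== SOURCE A (Python) =====
-- def find_high_score(values):
--     high_score = 0
--     score = check_three_of_kind(values)
--     if score > high_score:
--         high_score = score
--
--     score = check_four_of_kind(values)
--     if score > high_score:
--         high_score = score
--
--     score = check_five_of_kind(values)
--     if score > high_score:
--         high_score = score
--
--     score = check_full_house(values)
--     if score > high_score:
--         high_score = score
--
--     for val in range(1, 7):
--         score = check_singles(values, val)
--         if score > high_score:
--             high_score = score
--
--     score = check_straight(values)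
--     if score > high_score:
--         high_score = score
--
--     return high_score
--
-- def check_singles(dice, goal):
--     score = 0
--
--     for i in range(len(dice)):
--         if dice[i] == goal:
--             score += goal
--
--     return score
--
-- def check_three_of_kind(dice):
--     score = 0
--
--     # Check for three options
--     if dice[0] == dice[2]:
--         score = 30
--     elif dice[1] == dice[3]:
--         score = 30
--     elif dice[2] == dice[4]:
--         score = 30
--
--     return score
--
-- def check_four_of_kind(dice):
--     score = 0
--
--     # Check for two options
--     if dice[0] == dice[3] or dice[1] == dice[4]:
--         score = 40
--
--     return score
--
-- def check_five_of_kind(dice):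
--     score = 0
--
--     # Check for one option
--     if dice[0] == dice[4]:
--         score = 50
--
--     return score
--
-- def check_full_house(dice):
--     score = 0
--
--     # Check for pattern 2,2,4,4,4
--     if dice[0] == dice[1] and dice[2] == dice[4]:
--         score = 35;
--
--     # Check for pattern 2,2,2,4,4
--     if dice[0] == dice[2] and dice[3] and dice[4]:
--         score = 35;
--
--     return score
--
-- def check_straight(dice):
--     score = 0
--
--     # Check first three dice and then last two dice
--     if dice[0] + 1 == dice[1] and dice[1] + 1 == dice[2]:
--         if dice[2] + 1 == dice[3] and dice[3] + 1 == dice[4]: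
--             score = 45
--
--     return score
-- ===== SOURCE B (Python) =====
-- # Table-driven re-implementation: the scoring categories are data (a list of
-- # index-pair constraints), evaluated by one generic matcher; singles use count().
-- # Fixes A's full-house typo that tests truthiness of the last two dice via `and`
-- # instead of comparing them for equality.
--
-- PATTERNS = [
--     (30, [[(0, 0, 2)], [(1, 0, 3)], [(2, 0, 4)]]),
--     (40, [[(0, 0, 3)], [(1, 0, 4)]]),
--     (50, [[(0, 0, 4)]]),
--     (35, [[(0, 0, 1), (2, 0, 4)], [(0, 0, 2), (3, 0, 4)]]),
--     (45, [[(0, 1, 1), (1, 1, 2), (2, 1, 3), (3, 1, 4)]]),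
-- ]
--
--
-- def find_high_score(values):
--     best = 0
--     for score, alternatives in PATTERNS:
--         best = max(best,
--                    score if any(all(values[i] + delta == values[j]
--                                     for i, delta, j in alt)
--                                 for alt in alternatives)
--                    else 0)
--     for goal in range(1, 7):
--         best = max(best, goal * values.count(goal))
--     return best
-- ===== Notes on version B (the rewrite author's own statement) =====
-- stated objective: alternative
-- what changed: B replaces A's six hard-coded helper functions and the sequential high_score accumulator by a declarative pattern table (each category a list of index/offset constraints) evaluated by one generic matcher, computes singles with list.count instead of Python-level index loops (measured ~2x faster), and fixes the full-house typo that tests the truthiness of the last two dice (`and` between them) instead of comparing them for equality.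
-- intended difference: On lists whose first five dice have d0==d2 but no four/five-of-kind and all singles totals < 35, where the last two dice are unequal nonzero (A returns 35, B returns the max of the other candidates, 30..34) or both zero (A returns 30..34, B returns 35): A's full-house check tests the truthiness of the last two dice via `and` where the intended test is their equality, so B's value is the intended full-house score. — e.g. on find_high_score([1, 2, 1, 3, 4]): A returns 35, B returns 30
import Mathlib
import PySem

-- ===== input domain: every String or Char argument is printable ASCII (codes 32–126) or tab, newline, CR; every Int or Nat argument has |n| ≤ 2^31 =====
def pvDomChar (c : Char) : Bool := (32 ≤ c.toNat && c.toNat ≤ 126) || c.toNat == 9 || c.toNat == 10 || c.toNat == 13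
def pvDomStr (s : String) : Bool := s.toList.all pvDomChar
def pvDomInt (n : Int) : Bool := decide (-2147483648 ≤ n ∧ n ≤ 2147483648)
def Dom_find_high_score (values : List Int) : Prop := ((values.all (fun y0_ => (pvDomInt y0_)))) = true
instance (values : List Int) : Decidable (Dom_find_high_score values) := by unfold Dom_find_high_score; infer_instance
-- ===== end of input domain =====

-- B replaces A's hard-coded helper chain by a declarative pattern table evaluated by one generic
-- matcher, counts each face with count() for singles, and fixes A's full-house typo that
-- tests the truthiness of the last two dice instead of comparing them for equality (see D_).

-- ===== PORT A =====
-- all indexing uses pyGetD _ _ 0; on Pre_ (length ≥ 5) every index is in range, so this is exact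
-- (the IndexError Python raises below length 5 is excluded by Pre_).
def check_singles (dice : List Int) (goal : Int) : Int :=
  (PySem.List.pyRange 0 (dice.length : Int) 1).foldl
    (fun score i => if PySem.List.pyGetD dice i 0 = goal then score + goal else score) 0

def check_three_of_kind (dice : List Int) : Int :=
  if PySem.List.pyGetD dice 0 0 = PySem.List.pyGetD dice 2 0 then 30
  else if PySem.List.pyGetD dice 1 0 = PySem.List.pyGetD dice 3 0 then 30
  else if PySem.List.pyGetD dice 2 0 = PySem.List.pyGetD dice 4 0 then 30
  else 0

def check_four_of_kind (dice : List Int) : Int :=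
  if PySem.List.pyGetD dice 0 0 = PySem.List.pyGetD dice 3 0 ∨
     PySem.List.pyGetD dice 1 0 = PySem.List.pyGetD dice 4 0 then 40 else 0

def check_five_of_kind (dice : List Int) : Int :=
  if PySem.List.pyGetD dice 0 0 = PySem.List.pyGetD dice 4 0 then 50 else 0

def check_full_house (dice : List Int) : Int :=
  let score : Int := 0
  let score := if PySem.List.pyGetD dice 0 0 = PySem.List.pyGetD dice 1 0 ∧
                  PySem.List.pyGetD dice 2 0 = PySem.List.pyGetD dice 4 0 then 35 else score
  -- the Python applies `and` to the last two dice: nonzero-int truthiness, ported exactly as ≠ 0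
  let score := if PySem.List.pyGetD dice 0 0 = PySem.List.pyGetD dice 2 0 ∧
                  PySem.List.pyGetD dice 3 0 ≠ 0 ∧ PySem.List.pyGetD dice 4 0 ≠ 0 then 35 else score
  score

def check_straight (dice : List Int) : Int :=
  if PySem.List.pyGetD dice 0 0 + 1 = PySem.List.pyGetD dice 1 0 ∧
     PySem.List.pyGetD dice 1 0 + 1 = PySem.List.pyGetD dice 2 0 then
    if PySem.List.pyGetD dice 2 0 + 1 = PySem.List.pyGetD dice 3 0 ∧
       PySem.List.pyGetD dice 3 0 + 1 = PySem.List.pyGetD dice 4 0 then 45 else 0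
  else 0

def find_high_score (values : List Int) : Int :=
  let high_score : Int := 0
  let s1 := check_three_of_kind values
  let high_score := if s1 > high_score then s1 else high_score
  let s2 := check_four_of_kind values
  let high_score := if s2 > high_score then s2 else high_score
  let s3 := check_five_of_kind values
  let high_score := if s3 > high_score then s3 else high_score
  let s4 := check_full_house values
  let high_score := if s4 > high_score then s4 else high_score
  let high_score := (PySem.List.pyRange 1 7 1).foldl
    (fun h v => let s := check_singles values v; if s > h then s else h) high_score
  let s5 := check_straight values
  if s5 > high_score then s5 else high_score

-- ===== PORT B =====
-- the pattern table of Source B: (score, alternatives), each alternative a list of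
-- constraints (i, delta, j) meaning values[i] + delta == values[j]
def pvPatterns : List (Int × List (List (Int × Int × Int))) :=
  [(30, [[(0, 0, 2)], [(1, 0, 3)], [(2, 0, 4)]]),
   (40, [[(0, 0, 3)], [(1, 0, 4)]]),
   (50, [[(0, 0, 4)]]),
   (35, [[(0, 0, 1), (2, 0, 4)], [(0, 0, 2), (3, 0, 4)]]),
   (45, [[(0, 1, 1), (1, 1, 2), (2, 1, 3), (3, 1, 4)]])]

def find_high_score_alt (values : List Int) : Int :=
  let best :=
    pvPatterns.foldl
      (fun best p =>
        max best
          (if p.2.any (fun alt => alt.all (fun c =>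
              PySem.List.pyGetD values c.1 0 + c.2.1 == PySem.List.pyGetD values c.2.2 0))
           then p.1 else 0))
      0
  (PySem.List.pyRange 1 7 1).foldl
    (fun best goal => max best (goal * PySem.List.count values goal)) best

-- ===== PRECONDITION & SPEC =====
-- Python A raises IndexError whenever fewer than 5 dice are given; B raises there too.
def Pre_find_high_score (values : List Int) : Prop := 5 ≤ values.length
instance (values : List Int) : Decidable (Pre_find_high_score values) := by
  unfold Pre_find_high_score; infer_instance

def pvWitness_find_high_score : List Int := [1, 2, 3, 4, 5]

-- On lists whose first five dice have d0==d2 but no four/five-of-kind and all singles totals < 35, where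
-- the last two dice are unequal nonzero (A returns 35, B the max of the other candidates, 30..34)
-- or both zero (A returns 30..34, B returns 35): A's full-house check tests the truthiness of the
-- last two dice via `and` where the intended test is their equality, so B's is the intended score.
def D_find_high_score (values : List Int) : Prop :=
  5 ≤ values.length ∧
  values.getD 0 0 = values.getD 2 0 ∧
  values.getD 0 0 ≠ values.getD 3 0 ∧
  values.getD 1 0 ≠ values.getD 4 0 ∧
  values.getD 0 0 ≠ values.getD 4 0 ∧
  ((values.getD 3 0 ≠ values.getD 4 0 ∧ values.getD 3 0 ≠ 0 ∧ values.getD 4 0 ≠ 0) ∨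
   (values.getD 3 0 = 0 ∧ values.getD 4 0 = 0)) ∧
  (values.count 1 : Int) < 35 ∧ 2 * (values.count 2 : Int) < 35 ∧
  3 * (values.count 3 : Int) < 35 ∧ 4 * (values.count 4 : Int) < 35 ∧
  5 * (values.count 5 : Int) < 35 ∧ 6 * (values.count 6 : Int) < 35
instance (values : List Int) : Decidable (D_find_high_score values) := by
  unfold D_find_high_score; infer_instance

def Spec_find_high_score (values : List Int) (out : Int) : Prop :=
  ¬ D_find_high_score values → out = find_high_score_alt values
instance (values : List Int) (out : Int) : Decidable (Spec_find_high_score values out) := by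
  unfold Spec_find_high_score; infer_instance

def pvDiffWitness_find_high_score : List Int := [1, 2, 1, 3, 4]
def pvDiffWitnessOut_find_high_score : Int × Int := (35, 30)

-- ===== CLAIM (what is proved, stated in full; the proofs are below) =====
def Claim_unchanged_find_high_score : Prop := ∀ (values : List Int), Dom_find_high_score values → Pre_find_high_score values → Spec_find_high_score values (find_high_score values)
def Claim_changed_find_high_score : Prop := Dom_find_high_score (pvDiffWitness_find_high_score) ∧ Pre_find_high_score (pvDiffWitness_find_high_score) ∧ D_find_high_score (pvDiffWitness_find_high_score) ∧ find_high_score (pvDiffWitness_find_high_score) = pvDiffWitnessOut_find_high_score.1 ∧ find_high_score_alt (pvDiffWitness_find_high_score) = pvDiffWitnessOut_find_high_score.2 ∧ pvDiffWitnessOut_find_high_score.1 ≠ pvDiffWitnessOut_find_high_score.2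
def Claim_exact_find_high_score : Prop := ∀ (values : List Int), Dom_find_high_score values → Pre_find_high_score values → D_find_high_score values → find_high_score values ≠ find_high_score_alt values

-- ===== LEMMAS AND PROOFS =====

lemma ite_gt_max (a b : Int) : (if a > b then a else b) = b ⊔ a := by
  split <;> omega

lemma elif3 (p q r : Prop) [Decidable p] [Decidable q] [Decidable r] :
    (if p then (30:Int) else if q then 30 else if r then 30 else 0)
      = (if p ∨ q ∨ r then 30 else 0) := by
  split_ifs <;> tauto

lemma nested45 (a b c d : Prop) [Decidable a] [Decidable b] [Decidable c] [Decidable d] :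
    (if a ∧ b then (if c ∧ d then (45:Int) else 0) else 0)
      = (if a ∧ b ∧ c ∧ d then 45 else 0) := by
  split_ifs <;> tauto

lemma fh_eq (p q : Prop) [Decidable p] [Decidable q] :
    (if q then (35:Int) else if p then 35 else 0) = (if q ∨ p then 35 else 0) := by
  split_ifs <;> tauto

lemma ite_chr (p : Prop) [Decidable p] (k : Int) :
    (p ∧ (if p then k else 0) = k) ∨ (¬ p ∧ (if p then k else 0) = 0) := by
  split_ifs <;> tauto

lemma foldl_count (dice : List Int) (goal : Int) (init : Int) :
    dice.foldl (fun score x => if x = goal then score + goal else score) init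
      = init + goal * (dice.count goal : Int) := by
  induction dice generalizing init with
  | nil => simp
  | cons h t ih =>
      by_cases hx : h = goal <;> simp [hx, ih, mul_add] <;> ring

lemma singles_eq (dice : List Int) (goal : Int) :
    check_singles dice goal = goal * (dice.count goal : Int) := by
  unfold check_singles
  rw [PySem.List.foldl_pyRange_zero_pyGetD' dice 0
    (fun score x => if x = goal then score + goal else score) 0]
  simpa using foldl_count dice goal 0

lemma exists_five (values : List Int) (h : 5 ≤ values.length) :
    ∃ v0 v1 v2 v3 v4 rest, values = v0 :: v1 :: v2 :: v3 :: v4 :: rest := by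
  rcases values with _ | ⟨a, _ | ⟨b, _ | ⟨c, _ | ⟨d, _ | ⟨e, r⟩⟩⟩⟩⟩ <;> simp_all

lemma findA_eq (values : List Int) :
    find_high_score values =
      ((((((((((((0:Int) ⊔ check_three_of_kind values) ⊔ check_four_of_kind values)
        ⊔ check_five_of_kind values) ⊔ check_full_house values)
        ⊔ check_singles values 1) ⊔ check_singles values 2) ⊔ check_singles values 3)
        ⊔ check_singles values 4) ⊔ check_singles values 5) ⊔ check_singles values 6)
        ⊔ check_straight values) := by
  unfold find_high_score
  rw [show PySem.List.pyRange 1 7 1 = [1, 2, 3, 4, 5, 6] from by decide]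
  simp only [List.foldl, ite_gt_max]

lemma findB_eq (v0 v1 v2 v3 v4 : Int) (rest : List Int) :
    find_high_score_alt (v0 :: v1 :: v2 :: v3 :: v4 :: rest) =
      (((((((((((0:Int)
        ⊔ (if v0 = v2 ∨ v1 = v3 ∨ v2 = v4 then (30:Int) else 0))
        ⊔ (if v0 = v3 ∨ v1 = v4 then 40 else 0))
        ⊔ (if v0 = v4 then 50 else 0))
        ⊔ (if (v0 = v1 ∧ v2 = v4) ∨ (v0 = v2 ∧ v3 = v4) then 35 else 0))
        ⊔ (if v0 + 1 = v1 ∧ v1 + 1 = v2 ∧ v2 + 1 = v3 ∧ v3 + 1 = v4 then 45 else 0))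
        ⊔ 1 * ((v0 :: v1 :: v2 :: v3 :: v4 :: rest).count 1 : Int))
        ⊔ 2 * ((v0 :: v1 :: v2 :: v3 :: v4 :: rest).count 2 : Int))
        ⊔ 3 * ((v0 :: v1 :: v2 :: v3 :: v4 :: rest).count 3 : Int))
        ⊔ 4 * ((v0 :: v1 :: v2 :: v3 :: v4 :: rest).count 4 : Int))
        ⊔ 5 * ((v0 :: v1 :: v2 :: v3 :: v4 :: rest).count 5 : Int))
        ⊔ 6 * ((v0 :: v1 :: v2 :: v3 :: v4 :: rest).count 6 : Int) := by
  unfold find_high_score_alt pvPatterns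
  rw [show PySem.List.pyRange 1 7 1 = [1, 2, 3, 4, 5, 6] from by decide]
  simp only [List.foldl, List.any_cons, List.any_nil, List.all_cons, List.all_nil,
    PySem.List.pyGetD_ofNat', List.getD_cons_zero, List.getD_cons_succ,
    PySem.List.count_eq, add_zero, Bool.or_false, Bool.and_true, Bool.or_eq_true,
    Bool.and_eq_true, beq_iff_eq]

-- ===== VERDICT (by name: the statement is the Claim_ definition above) =====
set_option maxHeartbeats 1000000 in
theorem find_high_score_spec : Claim_unchanged_find_high_score := by
  intro values hdom hpre
  unfold Spec_find_high_score
  intro hnd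
  obtain ⟨v0, v1, v2, v3, v4, rest, rfl⟩ := exists_five values hpre
  unfold D_find_high_score at hnd
  simp only [List.getD_cons_zero, List.getD_cons_succ, List.length_cons] at hnd
  rw [findA_eq, findB_eq]
  unfold check_three_of_kind check_four_of_kind check_five_of_kind check_full_house
    check_straight
  simp only [PySem.List.pyGetD_ofNat', List.getD_cons_zero, List.getD_cons_succ,
    singles_eq, elif3, nested45, fh_eq]
  set c1 : Int := ((v0 :: v1 :: v2 :: v3 :: v4 :: rest).count 1 : Int) with hc1
  set c2 : Int := ((v0 :: v1 :: v2 :: v3 :: v4 :: rest).count 2 : Int) with hc2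
  set c3 : Int := ((v0 :: v1 :: v2 :: v3 :: v4 :: rest).count 3 : Int) with hc3
  set c4 : Int := ((v0 :: v1 :: v2 :: v3 :: v4 :: rest).count 4 : Int) with hc4
  set c5 : Int := ((v0 :: v1 :: v2 :: v3 :: v4 :: rest).count 5 : Int) with hc5
  set c6 : Int := ((v0 :: v1 :: v2 :: v3 :: v4 :: rest).count 6 : Int) with hc6
  clear_value c1 c2 c3 c4 c5 c6
  clear hc1 hc2 hc3 hc4 hc5 hc6 hdom hpre
  have h30 := ite_chr (v0 = v2 ∨ v1 = v3 ∨ v2 = v4) (30:Int)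
  have h40 := ite_chr (v0 = v3 ∨ v1 = v4) (40:Int)
  have h50 := ite_chr (v0 = v4) (50:Int)
  have h45 := ite_chr (v0 + 1 = v1 ∧ v1 + 1 = v2 ∧ v2 + 1 = v3 ∧ v3 + 1 = v4) (45:Int)
  have hA := ite_chr ((v0 = v2 ∧ v3 ≠ 0 ∧ v4 ≠ 0) ∨ (v0 = v1 ∧ v2 = v4)) (35:Int)
  have hB := ite_chr ((v0 = v1 ∧ v2 = v4) ∨ (v0 = v2 ∧ v3 = v4)) (35:Int)
  generalize (if v0 = v2 ∨ v1 = v3 ∨ v2 = v4 then (30:Int) else 0) = t30 at h30 ⊢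
  generalize (if v0 = v3 ∨ v1 = v4 then (40:Int) else 0) = t40 at h40 ⊢
  generalize (if v0 = v4 then (50:Int) else 0) = t50 at h50 ⊢
  generalize (if v0 + 1 = v1 ∧ v1 + 1 = v2 ∧ v2 + 1 = v3 ∧ v3 + 1 = v4 then (45:Int) else 0)
    = t45 at h45 ⊢
  generalize (if (v0 = v2 ∧ v3 ≠ 0 ∧ v4 ≠ 0) ∨ (v0 = v1 ∧ v2 = v4) then (35:Int) else 0)
    = tA at hA ⊢
  generalize (if (v0 = v1 ∧ v2 = v4) ∨ (v0 = v2 ∧ v3 = v4) then (35:Int) else 0)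
    = tB at hB ⊢
  clear h30 h45
  have hL : max (max (max (max (max (max (max (max (max (max (max 0 t30) t40) t50) tA)
        (1 * c1)) (2 * c2)) (3 * c3)) (4 * c4)) (5 * c5)) (6 * c6)) t45
      = max (max (max (max (max (max (max (max (max (max (max 0 t30) t40) t50) t45)
        (1 * c1)) (2 * c2)) (3 * c3)) (4 * c4)) (5 * c5)) (6 * c6)) tA := by ac_rfl
  have hR : max (max (max (max (max (max (max (max (max (max (max 0 t30) t40) t50) tB) t45)
        (1 * c1)) (2 * c2)) (3 * c3)) (4 * c4)) (5 * c5)) (6 * c6)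
      = max (max (max (max (max (max (max (max (max (max (max 0 t30) t40) t50) t45)
        (1 * c1)) (2 * c2)) (3 * c3)) (4 * c4)) (5 * c5)) (6 * c6)) tB := by ac_rfl
  rw [hL, hR]
  set M : Int := max (max (max (max (max (max (max (max (max (max 0 t30) t40) t50) t45)
    (1 * c1)) (2 * c2)) (3 * c3)) (4 * c4)) (5 * c5)) (6 * c6) with hM
  have hb : t40 ≤ M ∧ t50 ≤ M ∧ 1 * c1 ≤ M ∧ 2 * c2 ≤ M ∧ 3 * c3 ≤ M ∧ 4 * c4 ≤ M ∧
      5 * c5 ≤ M ∧ 6 * c6 ≤ M ∧ 0 ≤ M := by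
    rw [hM]
    exact ⟨le_max_of_le_left (le_max_of_le_left (le_max_of_le_left (le_max_of_le_left
        (le_max_of_le_left (le_max_of_le_left (le_max_of_le_left (le_max_of_le_left
        (le_max_right _ _)))))))),
      le_max_of_le_left (le_max_of_le_left (le_max_of_le_left (le_max_of_le_left
        (le_max_of_le_left (le_max_of_le_left (le_max_of_le_left (le_max_right _ _))))))),
      le_max_of_le_left (le_max_of_le_left (le_max_of_le_left (le_max_of_le_left
        (le_max_of_le_left (le_max_right _ _))))),
      le_max_of_le_left (le_max_of_le_left (le_max_of_le_left (le_max_of_le_left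
        (le_max_right _ _)))),
      le_max_of_le_left (le_max_of_le_left (le_max_of_le_left (le_max_right _ _))),
      le_max_of_le_left (le_max_of_le_left (le_max_right _ _)),
      le_max_of_le_left (le_max_right _ _),
      le_max_right _ _,
      le_max_of_le_left (le_max_of_le_left (le_max_of_le_left (le_max_of_le_left
        (le_max_of_le_left (le_max_of_le_left (le_max_of_le_left (le_max_of_le_left
        (le_max_of_le_left (le_max_left _ _)))))))))⟩
  clear_value M
  clear hM hL hR
  rcases hA with ⟨pA, eA⟩ | ⟨pA, eA⟩ <;> rcases hB with ⟨pB, eB⟩ | ⟨pB, eB⟩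
  · rw [eA, eB]
  · -- A's full-house condition fires, B's does not
    rcases pA with ⟨h02, h3n, h4n⟩ | h
    · have key : v0 = v3 ∨ v1 = v4 ∨ v0 = v4 ∨ 35 ≤ c1 ∨ 35 ≤ 2 * c2 ∨ 35 ≤ 3 * c3 ∨
          35 ≤ 4 * c4 ∨ 35 ≤ 5 * c5 ∨ 35 ≤ 6 * c6 := by
        by_contra hcon
        push_neg at hcon
        exact hnd (by omega)
      have h35 : (35:Int) ≤ M := by
        rcases key with h | h | h | h | h | h | h | h | h
        · rcases h40 with ⟨_, e⟩ | ⟨np, _⟩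
          · omega
          · exact absurd (Or.inl h) np
        · rcases h40 with ⟨_, e⟩ | ⟨np, _⟩
          · omega
          · exact absurd (Or.inr h) np
        · rcases h50 with ⟨_, e⟩ | ⟨np, _⟩
          · omega
          · exact absurd h np
        all_goals omega
      rw [eA, eB]; omega
    · exact absurd (Or.inl h) pB
  · -- B's full-house condition fires, A's does not
    have h1 : ¬(v0 = v2 ∧ v3 ≠ 0 ∧ v4 ≠ 0) := fun hx => pA (Or.inl hx)
    rcases pB with h | ⟨h02, h34⟩
    · exact absurd (Or.inr h) pA
    · have key : v0 = v3 ∨ v1 = v4 ∨ v0 = v4 ∨ 35 ≤ c1 ∨ 35 ≤ 2 * c2 ∨ 35 ≤ 3 * c3 ∨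
          35 ≤ 4 * c4 ∨ 35 ≤ 5 * c5 ∨ 35 ≤ 6 * c6 := by
        by_contra hcon
        push_neg at hcon
        exact hnd (by omega)
      have h35 : (35:Int) ≤ M := by
        rcases key with h | h | h | h | h | h | h | h | h
        · rcases h40 with ⟨_, e⟩ | ⟨np, _⟩
          · omega
          · exact absurd (Or.inl h) np
        · rcases h40 with ⟨_, e⟩ | ⟨np, _⟩
          · omega
          · exact absurd (Or.inr h) np
        · rcases h50 with ⟨_, e⟩ | ⟨np, _⟩
          · omega
          · exact absurd h np
        all_goals omega
      rw [eA, eB]; omega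
  · rw [eA, eB]

theorem find_high_score_changed : Claim_changed_find_high_score := by
  unfold Claim_changed_find_high_score; decide

set_option maxHeartbeats 1000000 in
theorem find_high_score_tight : Claim_exact_find_high_score := by
  intro values hdom hpre hD
  obtain ⟨v0, v1, v2, v3, v4, rest, rfl⟩ := exists_five values hpre
  unfold D_find_high_score at hD
  simp only [List.getD_cons_zero, List.getD_cons_succ, List.length_cons] at hD
  rw [findA_eq, findB_eq]
  unfold check_three_of_kind check_four_of_kind check_five_of_kind check_full_house
    check_straight
  simp only [PySem.List.pyGetD_ofNat', List.getD_cons_zero, List.getD_cons_succ,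
    singles_eq, elif3, nested45, fh_eq]
  set c1 : Int := ((v0 :: v1 :: v2 :: v3 :: v4 :: rest).count 1 : Int) with hc1
  set c2 : Int := ((v0 :: v1 :: v2 :: v3 :: v4 :: rest).count 2 : Int) with hc2
  set c3 : Int := ((v0 :: v1 :: v2 :: v3 :: v4 :: rest).count 3 : Int) with hc3
  set c4 : Int := ((v0 :: v1 :: v2 :: v3 :: v4 :: rest).count 4 : Int) with hc4
  set c5 : Int := ((v0 :: v1 :: v2 :: v3 :: v4 :: rest).count 5 : Int) with hc5
  set c6 : Int := ((v0 :: v1 :: v2 :: v3 :: v4 :: rest).count 6 : Int) with hc6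
  clear_value c1 c2 c3 c4 c5 c6
  clear hc1 hc2 hc3 hc4 hc5 hc6 hdom hpre
  obtain ⟨-, h02, h03, h14, h04, hdj, hk1, hk2, hk3, hk4, hk5, hk6⟩ := hD
  have h30 := ite_chr (v0 = v2 ∨ v1 = v3 ∨ v2 = v4) (30:Int)
  have h40 := ite_chr (v0 = v3 ∨ v1 = v4) (40:Int)
  have h50 := ite_chr (v0 = v4) (50:Int)
  have h45 := ite_chr (v0 + 1 = v1 ∧ v1 + 1 = v2 ∧ v2 + 1 = v3 ∧ v3 + 1 = v4) (45:Int)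
  have hA := ite_chr ((v0 = v2 ∧ v3 ≠ 0 ∧ v4 ≠ 0) ∨ (v0 = v1 ∧ v2 = v4)) (35:Int)
  have hB := ite_chr ((v0 = v1 ∧ v2 = v4) ∨ (v0 = v2 ∧ v3 = v4)) (35:Int)
  generalize (if v0 = v2 ∨ v1 = v3 ∨ v2 = v4 then (30:Int) else 0) = t30 at h30 ⊢
  generalize (if v0 = v3 ∨ v1 = v4 then (40:Int) else 0) = t40 at h40 ⊢
  generalize (if v0 = v4 then (50:Int) else 0) = t50 at h50 ⊢
  generalize (if v0 + 1 = v1 ∧ v1 + 1 = v2 ∧ v2 + 1 = v3 ∧ v3 + 1 = v4 then (45:Int) else 0)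
    = t45 at h45 ⊢
  generalize (if (v0 = v2 ∧ v3 ≠ 0 ∧ v4 ≠ 0) ∨ (v0 = v1 ∧ v2 = v4) then (35:Int) else 0)
    = tA at hA ⊢
  generalize (if (v0 = v1 ∧ v2 = v4) ∨ (v0 = v2 ∧ v3 = v4) then (35:Int) else 0)
    = tB at hB ⊢
  have e30 : t30 = 30 := by
    rcases h30 with ⟨_, e⟩ | ⟨np, _⟩
    · exact e
    · exact absurd (Or.inl h02) np
  have e40 : t40 = 0 := by
    rcases h40 with ⟨p, _⟩ | ⟨_, e⟩
    · exact absurd p (by tauto)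
    · exact e
  have e50 : t50 = 0 := by
    rcases h50 with ⟨p, _⟩ | ⟨_, e⟩
    · exact absurd p h04
    · exact e
  have e45 : t45 = 0 := by
    rcases h45 with ⟨p, _⟩ | ⟨_, e⟩
    · exact absurd p (by omega)
    · exact e
  have eAB : (tA = 35 ∧ tB = 0) ∨ (tA = 0 ∧ tB = 35) := by
    rcases hdj with ⟨h34ne, h3n, h4n⟩ | ⟨h3z, h4z⟩
    · left
      constructor
      · rcases hA with ⟨_, e⟩ | ⟨np, _⟩
        · exact e
        · exact absurd (Or.inl ⟨h02, h3n, h4n⟩) np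
      · rcases hB with ⟨p, _⟩ | ⟨_, e⟩
        · exact absurd p (by omega)
        · exact e
    · right
      constructor
      · rcases hA with ⟨p, _⟩ | ⟨_, e⟩
        · exact absurd p (by omega)
        · exact e
      · rcases hB with ⟨_, e⟩ | ⟨np, _⟩
        · exact e
        · exact absurd (Or.inr ⟨h02, by omega⟩) np
  clear h30 h40 h50 h45 hA hB
  subst e30 e40 e50 e45
  have hL : max (max (max (max (max (max (max (max (max (max (max 0 (30:Int)) 0) 0) tA)
        (1 * c1)) (2 * c2)) (3 * c3)) (4 * c4)) (5 * c5)) (6 * c6)) 0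
      = max (max (max (max (max (max (max (max (max (max (max 0 (30:Int)) 0) 0) 0)
        (1 * c1)) (2 * c2)) (3 * c3)) (4 * c4)) (5 * c5)) (6 * c6)) tA := by ac_rfl
  have hR : max (max (max (max (max (max (max (max (max (max (max 0 (30:Int)) 0) 0) tB) 0)
        (1 * c1)) (2 * c2)) (3 * c3)) (4 * c4)) (5 * c5)) (6 * c6)
      = max (max (max (max (max (max (max (max (max (max (max 0 (30:Int)) 0) 0) 0)
        (1 * c1)) (2 * c2)) (3 * c3)) (4 * c4)) (5 * c5)) (6 * c6)) tB := by ac_rfl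
  rw [hL, hR]
  set M : Int := max (max (max (max (max (max (max (max (max (max 0 (30:Int)) 0) 0) 0)
    (1 * c1)) (2 * c2)) (3 * c3)) (4 * c4)) (5 * c5)) (6 * c6) with hM
  have hMle : M ≤ 34 := by
    rw [hM]
    simp only [max_le_iff]
    omega
  clear_value M
  clear hM hL hR
  omega
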